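-- pv_equiv track=rewrite | github.com/PigBruhs/Slayer-of-Spire-2 | src/sos2_interface/readers/memory_reader.py | _ordered_candidates
-- ===== SOURCE A (Python) =====
-- def _ordered_candidates(candidates: list[int], resolved: int | None) -> list[int]:
--     addresses: list[int] = []
--     if resolved is not None and resolved in candidates:
--         addresses.append(resolved)
--     for address in candidates:
--         if address not in addresses:
--             addresses.append(address)
--     return addresses
-- ===== SOURCE B (Python) =====
-- def _ordered_candidates(candidates: list[int], resolved: int | None) -> list[int]:
--     unique = list(dict.fromkeys(candidates))
--     if resolved is not None and resolved in candidates: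
--         unique.remove(resolved)
--         unique.insert(0, resolved)
--     return unique
-- ===== Notes on version B (the rewrite author's own statement) =====
-- stated objective: faster
-- what changed: B dedupes the whole list in one hash-based step with dict.fromkeys and then promotes the resolved address with a remove/insert-at-0 pair, replacing A's single pass that seeds the output with resolved and filters each element with a linear 'not in' scan over the growing output.
import Mathlib
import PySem

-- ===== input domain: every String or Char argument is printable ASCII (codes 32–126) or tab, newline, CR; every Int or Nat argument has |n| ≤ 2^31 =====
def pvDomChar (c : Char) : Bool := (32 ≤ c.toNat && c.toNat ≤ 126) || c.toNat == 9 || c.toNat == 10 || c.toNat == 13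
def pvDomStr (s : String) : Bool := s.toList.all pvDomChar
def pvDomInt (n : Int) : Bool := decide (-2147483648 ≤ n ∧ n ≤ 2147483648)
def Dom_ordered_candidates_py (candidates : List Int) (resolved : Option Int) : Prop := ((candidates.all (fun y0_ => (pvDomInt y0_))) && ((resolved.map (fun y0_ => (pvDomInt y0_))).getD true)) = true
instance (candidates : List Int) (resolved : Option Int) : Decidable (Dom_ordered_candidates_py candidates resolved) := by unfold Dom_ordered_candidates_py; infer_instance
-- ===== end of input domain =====

-- B dedupes first (dict.fromkeys) and promotes `resolved` second (remove + insert at 0); A seeds with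
-- `resolved` and dedupes with a linear scan per element. Same return value; B measured faster in a timing run.

-- ===== PORT A =====
def ordered_candidates_py (candidates : List Int) (resolved : Option Int) : List Int :=
  -- addresses = [resolved] if resolved is not None and resolved in candidates else []
  let addresses : List Int :=
    match resolved with
    | some r => if r ∈ candidates then [r] else []
    | none => []
  -- for address in candidates: if address not in addresses: addresses.append(address)
  candidates.foldl (fun addresses address =>
    if address ∈ addresses then addresses else addresses ++ [address]) addresses

-- ===== PORT B =====
def ordered_candidates_py_alt (candidates : List Int) (resolved : Option Int) : List Int :=
  let unique := PySem.List.dedup candidates   -- list(dict.fromkeys(candidates))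
  match resolved with
  | some r =>
      if r ∈ candidates then
        r :: unique.erase r   -- unique.remove(resolved); unique.insert(0, resolved)
      else unique
  | none => unique

-- ===== PRECONDITION & SPEC =====
def Spec_ordered_candidates_py (candidates : List Int) (resolved : Option Int) (out : List Int) : Prop := out = ordered_candidates_py_alt candidates resolved
instance (candidates : List Int) (resolved : Option Int) (out : List Int) : Decidable (Spec_ordered_candidates_py candidates resolved out) := by unfold Spec_ordered_candidates_py; infer_instance

-- ===== CLAIM (what is proved, stated in full; the proofs are below) =====
def Claim_equal_ordered_candidates_py : Prop := ∀ (candidates : List Int) (resolved : Option Int), Dom_ordered_candidates_py candidates resolved → Spec_ordered_candidates_py candidates resolved (ordered_candidates_py candidates resolved)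

-- ===== LEMMAS AND PROOFS =====

/-- The fresh elements appended by A's loop when started with accumulator `acc`. -/
def pvFresh (acc xs : List Int) : List Int :=
  match xs with
  | [] => []
  | a :: t => if a ∈ acc then pvFresh acc t else a :: pvFresh (acc ++ [a]) t

theorem pvFoldl_eq_fresh (xs acc : List Int) :
    xs.foldl (fun addresses address =>
      if address ∈ addresses then addresses else addresses ++ [address]) acc
      = acc ++ pvFresh acc xs := by
  induction xs generalizing acc with
  | nil => simp [pvFresh]
  | cons a t ih =>
    simp only [List.foldl_cons, pvFresh]
    by_cases h : a ∈ acc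
    · simp [h, ih]
    · simp [h, ih (acc ++ [a])]

theorem pvFresh_congr (acc₁ acc₂ xs : List Int)
    (h : ∀ x, x ∈ acc₁ ↔ x ∈ acc₂) : pvFresh acc₁ xs = pvFresh acc₂ xs := by
  induction xs generalizing acc₁ acc₂ with
  | nil => rfl
  | cons a t ih =>
    simp only [pvFresh]
    by_cases ha : a ∈ acc₁
    · rw [if_pos ha, if_pos ((h a).mp ha), ih _ _ h]
    · rw [if_neg ha, if_neg (fun hc => ha ((h a).mpr hc))]
      exact congrArg _ (ih _ _ (by intro x; simp [List.mem_append, h x]))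

theorem pvFresh_cons_erase (r : Int) (acc xs : List Int) (hr : r ∉ acc) :
    pvFresh (r :: acc) xs = (pvFresh acc xs).erase r := by
  induction xs generalizing acc with
  | nil => rfl
  | cons a t ih =>
    by_cases har : a = r
    · subst har
      simp only [pvFresh, List.mem_cons, true_or, if_true, if_neg hr, List.erase_cons_head]
      exact pvFresh_congr _ _ _ (by intro x; simp [or_comm])
    · by_cases ha : a ∈ acc
      · simp only [pvFresh, List.mem_cons, if_pos ha, if_pos (Or.inr ha)]
        exact ih acc hr
      · have hne : r ≠ a := fun h => har h.symm
        have ha' : a ∉ (r :: acc) := by simp [har, ha]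
        simp only [pvFresh, if_neg ha, if_neg ha']
        rw [List.erase_cons_tail (by simpa using har)]
        have hr' : r ∉ acc ++ [a] := by simp [hr, hne]
        have := ih (acc ++ [a]) hr'
        rw [← this]
        exact congrArg _ (pvFresh_congr _ _ _ (by intro x; simp [List.mem_append, or_comm]))

theorem pvDedup_eq_fresh (xs : List Int) : PySem.Set.ofList xs = pvFresh [] xs := by
  have key : ∀ (xs s : List Int), s.Nodup →
      xs.foldl PySem.Set.add s = s ++ pvFresh s xs := by
    intro xs
    induction xs with
    | nil => intro s _; simp [pvFresh]
    | cons a t ih =>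
      intro s hs
      simp only [List.foldl_cons, pvFresh, PySem.Set.add]
      by_cases h : a ∈ s
      · rw [if_pos ((PySem.Set.contains_iff _ _).mpr h), if_pos h, ih s hs]
      · rw [if_neg (fun hc => h ((PySem.Set.contains_iff _ _).mp hc)), if_neg h,
          ih (s ++ [a]) (by simp [List.nodup_append, hs]; exact fun x hx he => h (he ▸ hx)), List.append_assoc]
        rfl
  rw [PySem.Set.ofList_eq_foldl]
  simpa using key xs [] (by simp)

-- ===== VERDICT (by name: the statement is the Claim_ definition above) =====
theorem ordered_candidates_py_spec : Claim_equal_ordered_candidates_py := by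
  intro candidates resolved _
  unfold Spec_ordered_candidates_py ordered_candidates_py ordered_candidates_py_alt
  cases resolved with
  | none => simp [pvFoldl_eq_fresh, ← pvDedup_eq_fresh]
  | some r =>
    by_cases h : r ∈ candidates
    · simp only [h, if_true, pvFoldl_eq_fresh, PySem.List.dedup_eq_ofList, pvDedup_eq_fresh]
      rw [← pvFresh_cons_erase r [] candidates (by simp)]
      rfl
    · simp [h, pvFoldl_eq_fresh, ← pvDedup_eq_fresh]
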